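-- pv_equiv track=rewrite | github.com/joaoponcesc/ist-2021-fp | fp-tic-tac-toe.py | eh_posicao_livre
-- ===== SOURCE A (Python) =====
-- def eh_tabuleiro(x):
--     '''
--
--     :param x: equivale ao tabuleiro
--     :return:  verifica se o tabulerio e valido
--     '''
--     if type(x) != tuple:
--         return False
--     if len(x) != 3:
--         return False
--     for c in x:
--         if type(c) != tuple:
--             return False
--         if len(c) != 3:
--             return False
--         for p in c:
--             if (p != 1 and p != 0 and p != -1) or type(p) != int:
--                 return False
--     return True
--
-- def eh_posicao(x):
--     '''
--
--     :param x: equivale ao tabuleiro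
--     :return:  verifica se uma posicao e valida
--     '''
--     if type(x) != int or x <= 0 or x > 9:
--         return False
--     return True
--
-- def eh_posicao_livre(x, y):
--     '''
--
--     :param x: equivale ao tabuleiro
--     :param y: posicao a verificar se esta livre
--     :return:  True (se a posicao esta livre) e False (se nao esta livre)
--     '''
--     if eh_posicao(y) == False or eh_tabuleiro(x) == False:
--         raise ValueError("eh_posicao_livre: algum dos argumentos e invalido")
--     if y == 1 or y == 2 or y == 3:
--         i = j = 0
--         while i < len(x[j]):
--             if x[j][i] == 0 and i + 1 == y:
--                 return True
--             i += 1
--     if y == 4 or y == 5 or y == 6: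
--         j, i = 1, 0
--         while i < len(x[j]):
--             if x[j][i] == 0 and i + 4 == y:
--                 return True
--             i += 1
--     if y == 7 or y == 8 or y == 9:
--         j, i = 2, 0
--         while i < len(x[j]):
--             if x[j][i] == 0 and i + 7 == y:
--                 return True
--             i += 1
--     return False
-- ===== SOURCE B (Python) =====
-- def eh_tabuleiro(x):
--     if type(x) != tuple:
--         return False
--     if len(x) != 3:
--         return False
--     for c in x:
--         if type(c) != tuple:
--             return False
--         if len(c) != 3:
--             return False
--         for p in c:
--             if (p != 1 and p != 0 and p != -1) or type(p) != int:
--                 return False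
--     return True
--
-- def eh_posicao(x):
--     if type(x) != int or x <= 0 or x > 9:
--         return False
--     return True
--
-- def eh_posicao_livre(x, y):
--     if eh_posicao(y) == False or eh_tabuleiro(x) == False:
--         raise ValueError("eh_posicao_livre: algum dos argumentos e invalido")
--     row, col = divmod(y - 1, 3)
--     return x[row][col] == 0
-- ===== Notes on version B (the rewrite author's own statement) =====
-- stated objective: simpler
-- what changed: Replaces the three y-range branches each with a while-loop scan over a row by a closed-form index row, col = divmod(y-1, 3) and a direct x[row][col] == 0 test; validation guard and ValueError are unchanged.
import Mathlib
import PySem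

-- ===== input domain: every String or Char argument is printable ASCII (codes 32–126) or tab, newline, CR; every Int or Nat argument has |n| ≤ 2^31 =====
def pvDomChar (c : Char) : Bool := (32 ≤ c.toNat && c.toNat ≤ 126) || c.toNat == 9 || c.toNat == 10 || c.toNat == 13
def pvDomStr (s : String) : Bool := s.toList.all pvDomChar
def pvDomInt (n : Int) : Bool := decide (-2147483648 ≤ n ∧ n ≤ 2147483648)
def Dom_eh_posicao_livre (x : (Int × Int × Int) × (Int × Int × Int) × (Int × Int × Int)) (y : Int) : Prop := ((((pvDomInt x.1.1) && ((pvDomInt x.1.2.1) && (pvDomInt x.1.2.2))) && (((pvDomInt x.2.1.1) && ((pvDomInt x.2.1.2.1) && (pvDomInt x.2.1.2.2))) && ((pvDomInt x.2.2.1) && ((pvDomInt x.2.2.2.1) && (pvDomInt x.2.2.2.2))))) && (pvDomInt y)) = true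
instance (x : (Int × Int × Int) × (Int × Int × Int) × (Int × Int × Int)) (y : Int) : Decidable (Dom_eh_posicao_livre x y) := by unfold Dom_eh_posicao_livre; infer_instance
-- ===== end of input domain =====

-- B replaces A's three per-row while-loop scans with a closed-form divmod index (simpler; same guard).
-- Both Pythons raise ValueError when the arguments are invalid; Pre_ excludes exactly those inputs
-- and both ports return false there.

-- ===== PORT A =====
-- helper shared by both Pythons (identical code in Source A and Source B):
-- cell check 'if (p != 1 and p != 0 and p != -1) or type(p) != int: return False'
-- (the type tests are vacuous under the Lean type convention)
def pvCellOk (p : Int) : Bool := !(p != 1 && p != 0 && p != -1)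
def pvRowOk (c : Int × Int × Int) : Bool := pvCellOk c.1 && pvCellOk c.2.1 && pvCellOk c.2.2
def eh_tabuleiro (x : (Int × Int × Int) × (Int × Int × Int) × (Int × Int × Int)) : Bool :=
  pvRowOk x.1 && pvRowOk x.2.1 && pvRowOk x.2.2
def eh_posicao (y : Int) : Bool := if y ≤ 0 ∨ y > 9 then false else true

-- A's 'while i < len(x[j])' scan of one row (len = 3): returns True when x[j][i] == 0 and i + off == y
def pvRowGet (c : Int × Int × Int) (i : Nat) : Int :=
  match i with | 0 => c.1 | 1 => c.2.1 | _ => c.2.2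
def pvScan (c : Int × Int × Int) (i : Nat) (off y : Int) : Bool :=
  if i < 3 then
    (if pvRowGet c i == 0 && ((i : Int) + off == y) then true else pvScan c (i + 1) off y)
  else false
termination_by 3 - i

def eh_posicao_livre (x : (Int × Int × Int) × (Int × Int × Int) × (Int × Int × Int)) (y : Int) : Bool :=
  if eh_posicao y == false || eh_tabuleiro x == false then false   -- Python raises ValueError here (outside Pre_)
  else if (y == 1 || y == 2 || y == 3) && pvScan x.1 0 1 y then true
  else if (y == 4 || y == 5 || y == 6) && pvScan x.2.1 0 4 y then true
  else if (y == 7 || y == 8 || y == 9) && pvScan x.2.2 0 7 y then true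
  else false

-- ===== PORT B =====
def pvRowOfIdx (x : (Int × Int × Int) × (Int × Int × Int) × (Int × Int × Int)) (r : Int) : Int × Int × Int :=
  if r == 0 then x.1 else if r == 1 then x.2.1 else x.2.2   -- x[row], row ∈ {0,1,2} under the guard
def pvColOfIdx (c : Int × Int × Int) (j : Int) : Int :=
  if j == 0 then c.1 else if j == 1 then c.2.1 else c.2.2   -- row[col], col ∈ {0,1,2} under the guard

def eh_posicao_livre_alt (x : (Int × Int × Int) × (Int × Int × Int) × (Int × Int × Int)) (y : Int) : Bool :=
  if eh_posicao y == false || eh_tabuleiro x == false then false   -- Python raises ValueError here (outside Pre_)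
  else
    let row := PySem.Int.floordiv (y - 1) 3
    let col := PySem.Int.mod (y - 1) 3
    pvColOfIdx (pvRowOfIdx x row) col == 0

-- ===== PRECONDITION & SPEC =====
-- Pre_: exactly the inputs where A (and B) return normally instead of raising ValueError:
-- y a valid position (1..9) and every board entry in {1, 0, -1}.
def Pre_eh_posicao_livre (x : (Int × Int × Int) × (Int × Int × Int) × (Int × Int × Int)) (y : Int) : Prop :=
  (1 ≤ y ∧ y ≤ 9) ∧ eh_tabuleiro x = true
instance (x : (Int × Int × Int) × (Int × Int × Int) × (Int × Int × Int)) (y : Int) : Decidable (Pre_eh_posicao_livre x y) := by unfold Pre_eh_posicao_livre; infer_instance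
def pvWitness_eh_posicao_livre : ((Int × Int × Int) × (Int × Int × Int) × (Int × Int × Int)) × Int :=
  (((1, 0, -1), (0, 0, 1), (-1, 1, 0)), 5)

def Spec_eh_posicao_livre (x : (Int × Int × Int) × (Int × Int × Int) × (Int × Int × Int)) (y : Int) (out : Bool) : Prop := out = eh_posicao_livre_alt x y
instance (x : (Int × Int × Int) × (Int × Int × Int) × (Int × Int × Int)) (y : Int) (out : Bool) : Decidable (Spec_eh_posicao_livre x y out) := by unfold Spec_eh_posicao_livre; infer_instance

-- ===== CLAIM (what is proved, stated in full; the proofs are below) =====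
def Claim_equal_eh_posicao_livre : Prop := ∀ (x : (Int × Int × Int) × (Int × Int × Int) × (Int × Int × Int)) (y : Int), Dom_eh_posicao_livre x y → Pre_eh_posicao_livre x y → Spec_eh_posicao_livre x y (eh_posicao_livre x y)

-- ===== LEMMAS AND PROOFS =====
theorem pv_decide_beq (a b : Int) : decide (a = b) = (a == b) := by
  by_cases h : a = b <;> simp [h]

theorem pv_equal : ∀ (x : (Int × Int × Int) × (Int × Int × Int) × (Int × Int × Int)) (y : Int),
    Pre_eh_posicao_livre x y → eh_posicao_livre x y = eh_posicao_livre_alt x y := by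
  intro x y hpre
  obtain ⟨⟨hy1, hy9⟩, htb⟩ := hpre
  interval_cases y <;>
    simp [eh_posicao_livre, eh_posicao_livre_alt, eh_posicao, htb, pvScan, pvRowGet,
      pvRowOfIdx, pvColOfIdx, PySem.Int.floordiv, PySem.Int.mod, pv_decide_beq]

-- ===== VERDICT (by name: the statement is the Claim_ definition above) =====
theorem eh_posicao_livre_spec : Claim_equal_eh_posicao_livre := by
  intro x y _ hpre
  exact pv_equal x y hpre
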